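-- pv_equiv track=rewrite | github.com/sagemath/sage-archive-2023-02-01 | src/sage/graphs/graph_isom.py | all_ordered_partitions
-- ===== SOURCE A (Python) =====
-- def kpow(listy, k):
--     """
--     Returns the subset of the power set of listy consisting of subsets of size
--     k. Used in all_ordered_partitions.
--     """
--     list = []
--     if k > 1:
--         for L in kpow(listy, k-1):
--             for a in listy:
--                 if not a in L:
--                     list.append([a] + L)
--     if k == 1:
--         for i in listy:
--             list.append([i])
--     return list
--
-- def all_ordered_partitions(listy):
--     """
--     Returns all ordered partitions of the set {0,1,...,n-1}. Used in
--     benchmarking the search algorithm.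
--     """
--     L = []
--     for i in range(1,len(listy)+1):
--         for cell in kpow(listy, i):
--             list_remainder = [x for x in listy if x not in cell]
--             remainder_partitions = all_ordered_partitions(list_remainder)
--             for remainder in remainder_partitions:
--                 L.append( [cell] + remainder )
--     if len(listy) == 0:
--         return [[]]
--     else:
--         return L
-- ===== SOURCE B (Python) =====
-- def all_ordered_partitions(listy):
--     memo = {}
--     def ap(t):
--         r = memo.get(t)
--         if r is None:
--             if not t:
--                 r = [[]]
--             else:
--                 r = []
--                 level = [[x] for x in t]
--                 while level:
--                     for cell in level:
--                         rest = tuple(x for x in t if x not in cell)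
--                         for rem in ap(rest):
--                             r.append([cell] + rem)
--                     level = [[a] + L for L in level for a in t if a not in L]
--             memo[t] = r
--         return r
--     return ap(tuple(listy))
-- ===== Notes on version B (the rewrite author's own statement) =====
-- stated objective: faster
-- what changed: B memoizes the partition list of every remainder in a dict keyed by the remainder tuple so each distinct sublist is solved once and its result shared, and it grows the size-k cell level incrementally from the previous level instead of re-running kpow's full recursion for every size i.
import Mathlib
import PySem

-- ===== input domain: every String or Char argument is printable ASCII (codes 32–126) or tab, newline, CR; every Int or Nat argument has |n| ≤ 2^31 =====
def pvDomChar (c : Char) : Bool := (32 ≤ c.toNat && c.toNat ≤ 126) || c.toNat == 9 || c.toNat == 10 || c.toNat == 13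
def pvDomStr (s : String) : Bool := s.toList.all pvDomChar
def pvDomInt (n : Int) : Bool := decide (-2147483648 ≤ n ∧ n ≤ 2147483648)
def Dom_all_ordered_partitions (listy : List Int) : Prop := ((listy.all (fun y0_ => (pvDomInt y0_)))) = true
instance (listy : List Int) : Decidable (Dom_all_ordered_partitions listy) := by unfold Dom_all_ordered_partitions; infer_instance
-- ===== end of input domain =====

-- B memoizes partitions per remainder and builds cell levels incrementally instead of re-running
-- kpow for every size; objective: faster. Equal return value proved on all inputs.

-- ===== PORT A =====
def kpow (listy : List Int) (k : Int) : List (List Int) :=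
  let list0 : List (List Int) := []
  let list1 : List (List Int) :=
    if _h : 1 < k then
      (kpow listy (k - 1)).foldl
        (fun acc L =>
          listy.foldl (fun acc a => if !L.contains a then acc ++ [[a] ++ L] else acc) acc)
        list0
    else list0
  if k = 1 then listy.foldl (fun acc i => acc ++ [[i]]) list1 else list1
termination_by k.toNat
decreasing_by omega

-- used only for the termination of the port of A (every cell kpow yields meets listy)
theorem kpow_mem_exists (listy : List Int) (k : Int) (cell : List Int)
    (h : cell ∈ kpow listy k) : ∃ x ∈ listy, cell.contains x = true := by
  rw [kpow.eq_def] at h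
  simp only [PySem.List.foldl_append_if, PySem.List.foldl_append_singleton_eq_map] at h
  by_cases h1 : (1 : Int) < k
  · rw [dif_pos h1] at h
    rw [PySem.List.foldl_append_eq_flatMap, List.nil_append] at h
    by_cases hk1 : k = 1
    · omega
    · rw [if_neg hk1] at h
      obtain ⟨L, _, hmem⟩ := List.mem_flatMap.mp h
      obtain ⟨a, ha, rfl⟩ := List.mem_map.mp hmem
      exact ⟨a, (List.mem_filter.mp ha).1, by simp⟩
  · rw [dif_neg h1] at h
    by_cases hk1 : k = 1
    · rw [if_pos hk1] at h
      obtain ⟨i, hi, rfl⟩ := List.mem_map.mp h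
      exact ⟨i, hi, by simp⟩
    · rw [if_neg hk1] at h
      simp at h

def all_ordered_partitions (listy : List Int) : List (List (List Int)) :=
  let L : List (List (List Int)) :=
    (PySem.List.pyRange 1 ((listy.length : Int) + 1) 1).foldl
      (fun acc i =>
        (kpow listy i).attach.foldl
          (fun acc cell =>
            let list_remainder := listy.filter fun x => !cell.1.contains x
            let remainder_partitions := all_ordered_partitions list_remainder
            remainder_partitions.foldl (fun acc remainder => acc ++ [[cell.1] ++ remainder]) acc)
          acc)
      []
  if listy.length = 0 then [[]] else L
termination_by listy.length
decreasing_by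
  obtain ⟨x, hx, hc⟩ := kpow_mem_exists listy i cell.1 cell.2
  have hx' : x ∈ cell.1 := by simpa using hc
  simp only [List.length_unattach]
  rw [← List.length_attach (l := listy)]
  exact List.length_filter_lt_length_iff_exists.mpr ⟨⟨x, hx⟩, List.mem_attach _ _, by simp [hx']⟩

-- ===== PORT B =====
mutual
def pvApMemo (t : List Int) (memo : PySem.Dict (List Int) (List (List (List Int)))) :
    List (List (List Int)) × PySem.Dict (List Int) (List (List (List Int))) :=
  match memo.get? t with
  | some r => (r, memo)
  | none =>
    let p :=
      if t.isEmpty then (([[]] : List (List (List Int))), memo)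
      else pvApLoop t (t.length + 1) (t.map fun x => [x]) [] memo
    (p.1, p.2.insert t p.1)
termination_by (t.length, t.length + 2)
decreasing_by
  exact Prod.Lex.right _ (by omega)

def pvApLoop (t : List Int) (fuel : Nat) (level : List (List Int))
    (out : List (List (List Int))) (memo : PySem.Dict (List Int) (List (List (List Int)))) :
    List (List (List Int)) × PySem.Dict (List Int) (List (List (List Int))) :=
  match fuel with
  | 0 => (out, memo)
  | fuel + 1 =>
    if level.isEmpty then (out, memo)
    else
      let p := level.foldl
        (fun (p : List (List (List Int)) × PySem.Dict (List Int) (List (List (List Int)))) cell =>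
          let rest := t.filter fun x => !cell.contains x
          if h : rest.length < t.length then
            let q := pvApMemo rest p.2
            (q.1.foldl (fun acc rem => acc ++ [[cell] ++ rem]) p.1, q.2)
          else p)
        (out, memo)
      pvApLoop t fuel (level.flatMap fun L => (t.filter fun a => !L.contains a).map fun a => [a] ++ L) p.1 p.2
termination_by (t.length, fuel)
decreasing_by
  · exact Prod.Lex.left _ _ h
  · exact Prod.Lex.right _ (by omega)
end

def all_ordered_partitions_alt (listy : List Int) : List (List (List Int)) :=
  (pvApMemo listy PySem.Dict.empty).1

-- ===== PRECONDITION & SPEC =====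
def Spec_all_ordered_partitions (listy : List Int) (out : List (List (List Int))) : Prop := out = all_ordered_partitions_alt listy
instance (listy : List Int) (out : List (List (List Int))) : Decidable (Spec_all_ordered_partitions listy out) := by unfold Spec_all_ordered_partitions; infer_instance

-- ===== CLAIM (what is proved, stated in full; the proofs are below) =====
def Claim_equal_all_ordered_partitions : Prop := ∀ (listy : List Int), Dom_all_ordered_partitions listy → Spec_all_ordered_partitions listy (all_ordered_partitions listy)

-- ===== LEMMAS AND PROOFS =====

-- one level of cells built from the previous one
def pvStep (t : List Int) (lev : List (List Int)) : List (List Int) :=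
  lev.flatMap fun L => (t.filter fun a => !L.contains a).map fun a => [a] ++ L

-- the level of cells of size d+1, in A's (= kpow's) order
def pvLvl (t : List Int) : Nat → List (List Int)
  | 0 => t.map fun x => [x]
  | d + 1 => pvStep t (pvLvl t d)

-- contribution of one level of cells to the partition list
def pvF (t : List Int) (lev : List (List Int)) : List (List (List Int)) :=
  lev.flatMap fun cell =>
    (all_ordered_partitions (t.filter fun x => !cell.contains x)).map fun r => [cell] ++ r

-- what B's while-loop appends: levels until empty or out of fuel
def pvJ (t : List Int) : Nat → List (List Int) → List (List (List Int))
  | 0, _ => []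
  | f + 1, lev => if lev.isEmpty then [] else pvF t lev ++ pvJ t f (pvStep t lev)

-- the memo only ever holds correct partition lists
def pvInv (memo : PySem.Dict (List Int) (List (List (List Int)))) : Prop :=
  ∀ k r, memo.get? k = some r → r = all_ordered_partitions k

theorem kpow_one (l : List Int) : kpow l 1 = l.map fun i => [i] := by
  rw [kpow.eq_def]
  simp only [dif_neg (show ¬ (1:Int) < 1 by omega), if_true,
    PySem.List.foldl_append_singleton_eq_map, List.nil_append]

theorem kpow_succ (l : List Int) (k : Int) (hk : 1 ≤ k) :
    kpow l (k + 1) = pvStep l (kpow l k) := by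
  rw [kpow.eq_def]
  simp only [dif_pos (show (1:Int) < k + 1 by omega), if_neg (show ¬ k + 1 = 1 by omega),
    add_sub_cancel_right, PySem.List.foldl_append_if,
    PySem.List.foldl_append_eq_flatMap, List.nil_append, pvStep]

theorem kpow_lvl (l : List Int) (d : Nat) : kpow l (1 + (d : Int)) = pvLvl l d := by
  induction d with
  | zero => simpa using kpow_one l
  | succ d ih =>
    have h1 : (1 + ((d + 1 : Nat) : Int)) = (1 + (d : Int)) + 1 := by push_cast; ring
    rw [h1, kpow_succ l (1 + (d : Int)) (by omega), ih, pvLvl]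

theorem A_flat (t : List Int) :
    all_ordered_partitions t =
      if t.length = 0 then [[]]
      else (List.range t.length).flatMap fun d => pvF t (pvLvl t d) := by
  rw [all_ordered_partitions.eq_def]
  simp only [PySem.List.foldl_append_singleton_eq_map,
    PySem.List.foldl_append_eq_flatMap, List.nil_append]
  simp only [List.flatMap_subtype, List.unattach_attach, PySem.List.pyRange_one]
  by_cases ht : t.length = 0
  · simp [ht]
  · rw [if_neg ht, if_neg ht]
    have hn : ((t.length : Int) + 1 - 1).toNat = t.length := by omega
    rw [hn, List.flatMap_map]
    refine List.flatMap_congr ?_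
    intro d _
    rw [kpow_lvl]
    rfl

theorem lvl_props (t : List Int) (d : Nat) (cell : List Int) (h : cell ∈ pvLvl t d) :
    cell.length = d + 1 ∧ cell.Nodup ∧ cell ⊆ t := by
  induction d generalizing cell with
  | zero =>
    simp only [pvLvl, List.mem_map] at h
    obtain ⟨x, hx, rfl⟩ := h
    exact ⟨rfl, by simp, by simpa using hx⟩
  | succ d ih =>
    simp only [pvLvl, pvStep, List.mem_flatMap, List.mem_map, List.mem_filter] at h
    obtain ⟨L, hL, a, ⟨haT, haL⟩, rfl⟩ := h
    obtain ⟨hlen, hnd, hsub⟩ := ih L hL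
    have haL' : a ∉ L := by simpa using haL
    refine ⟨by simp [hlen], by simp [List.nodup_cons, haL', hnd], ?_⟩
    intro x hx
    rcases (by simpa using hx : x = a ∨ x ∈ L) with rfl | hxL
    · exact haT
    · exact hsub hxL

theorem lvl_full_nil (t : List Int) : pvLvl t t.length = [] := by
  rcases h : pvLvl t t.length with _ | ⟨cell, rest⟩
  · rfl
  · exfalso
    have hm : cell ∈ pvLvl t t.length := by rw [h]; exact List.mem_cons_self ..
    obtain ⟨hlen, hnd, hsub⟩ := lvl_props t t.length cell hm
    have := List.Subperm.length_le (List.subperm_of_subset hnd hsub)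
    omega

theorem lvl_nil_of_nil (t : List Int) (d j : Nat) (h : pvLvl t d = []) : pvLvl t (d + j) = [] := by
  induction j with
  | zero => exact h
  | succ j ih => rw [Nat.add_succ, pvLvl, ih]; rfl

theorem J_flat (t : List Int) (f d : Nat) :
    pvJ t f (pvLvl t d) = (List.range f).flatMap fun j => pvF t (pvLvl t (d + j)) := by
  induction f generalizing d with
  | zero => simp [pvJ]
  | succ f ih =>
    by_cases h : pvLvl t d = []
    · rw [pvJ, if_pos (by simp [h])]
      have hall : ∀ j, pvLvl t (d + j) = [] := fun j => lvl_nil_of_nil t d j h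
      symm
      simp [hall, pvF]
    · rw [pvJ, if_neg (by simpa using h)]
      have hstep : pvStep t (pvLvl t d) = pvLvl t (d + 1) := rfl
      rw [hstep, ih, List.range_succ_eq_map]
      simp only [List.flatMap_cons, List.flatMap_map, Nat.add_zero]
      congr 1
      refine List.flatMap_congr ?_
      intro j _
      have : d + 1 + j = d + (j + 1) := by omega
      rw [this]

def pvCellStep (t : List Int)
    (p : List (List (List Int)) × PySem.Dict (List Int) (List (List (List Int))))
    (cell : List Int) :
    List (List (List Int)) × PySem.Dict (List Int) (List (List (List Int))) :=
  if _h : (t.filter fun x => !cell.contains x).length < t.length then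
    (p.1 ++ ((pvApMemo (t.filter fun x => !cell.contains x) p.2).1.map fun rem => [cell] ++ rem),
      (pvApMemo (t.filter fun x => !cell.contains x) p.2).2)
  else p

theorem fold_cells (t : List Int)
    (hrec : ∀ l, l.length < t.length → ∀ m, pvInv m →
      (pvApMemo l m).1 = all_ordered_partitions l ∧ pvInv (pvApMemo l m).2) :
    ∀ (lev : List (List Int))
      (acc : List (List (List Int)) × PySem.Dict (List Int) (List (List (List Int)))),
      pvInv acc.2 → (∀ cell ∈ lev, ∃ x ∈ t, x ∈ cell) →
      (lev.foldl (pvCellStep t) acc).1 = acc.1 ++ pvF t lev ∧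
      pvInv (lev.foldl (pvCellStep t) acc).2 := by
  intro lev
  induction lev with
  | nil => intro acc hm _; exact ⟨by simp [pvF], hm⟩
  | cons cell lev ih =>
    intro acc hm hlev
    obtain ⟨x, hxT, hxC⟩ := hlev cell (List.mem_cons_self ..)
    have hlt : (t.filter fun x => !cell.contains x).length < t.length :=
      List.length_filter_lt_length_iff_exists.mpr ⟨x, hxT, by simp [hxC]⟩
    rw [List.foldl_cons,
      show pvCellStep t acc cell =
        (acc.1 ++ ((pvApMemo (t.filter fun x => !cell.contains x) acc.2).1.map
            fun rem => [cell] ++ rem),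
          (pvApMemo (t.filter fun x => !cell.contains x) acc.2).2) from by
        rw [pvCellStep, dif_pos hlt]]
    obtain ⟨hq1, hq2⟩ := hrec (t.filter fun x => !cell.contains x) hlt acc.2 hm
    obtain ⟨h1, h2⟩ := ih (acc.1 ++ ((pvApMemo (t.filter fun x => !cell.contains x) acc.2).1.map
        fun rem => [cell] ++ rem), (pvApMemo (t.filter fun x => !cell.contains x) acc.2).2)
      hq2 (fun c hc => hlev c (List.mem_cons_of_mem _ hc))
    refine ⟨?_, h2⟩
    rw [h1, hq1]
    simp [pvF, List.flatMap_cons, List.append_assoc]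

theorem loop_spec (t : List Int)
    (hrec : ∀ l, l.length < t.length → ∀ m, pvInv m →
      (pvApMemo l m).1 = all_ordered_partitions l ∧ pvInv (pvApMemo l m).2) :
    ∀ (fuel : Nat) (level : List (List Int)) (out : List (List (List Int)))
      (memo : PySem.Dict (List Int) (List (List (List Int)))),
      pvInv memo → (∀ cell ∈ level, ∃ x ∈ t, x ∈ cell) →
      (pvApLoop t fuel level out memo).1 = out ++ pvJ t fuel level ∧
      pvInv (pvApLoop t fuel level out memo).2 := by
  intro fuel
  induction fuel with
  | zero => intro level out memo hm _; simp only [pvApLoop, pvJ]; exact ⟨by simp, hm⟩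
  | succ fuel ih =>
    intro level out memo hm hlev
    rw [pvApLoop, pvJ]
    by_cases hemp : level.isEmpty
    · rw [if_pos hemp, if_pos hemp]; exact ⟨by simp, hm⟩
    · rw [if_neg hemp, if_neg hemp]
      have hbody : (fun (p : List (List (List Int)) ×
            PySem.Dict (List Int) (List (List (List Int)))) cell =>
          let rest := t.filter fun x => !cell.contains x
          if h : rest.length < t.length then
            let q := pvApMemo rest p.2
            (q.1.foldl (fun acc rem => acc ++ [[cell] ++ rem]) p.1, q.2)
          else p) = pvCellStep t := by
        funext p cell
        simp only [pvCellStep, PySem.List.foldl_append_singleton_eq_map]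
      rw [hbody]
      obtain ⟨h1, h2⟩ := fold_cells t hrec level (out, memo) hm hlev
      have hstepinv : ∀ cell ∈ level.flatMap fun L =>
          (t.filter fun a => !L.contains a).map fun a => [a] ++ L, ∃ x ∈ t, x ∈ cell := by
        intro cell hc
        obtain ⟨L, _, a, ha, rfl⟩ := by simpa using hc
        exact ⟨a, ha.1, by simp⟩
      obtain ⟨h3, h4⟩ := ih (level.flatMap fun L =>
          (t.filter fun a => !L.contains a).map fun a => [a] ++ L) _ _ h2 hstepinv
      refine ⟨?_, h4⟩
      rw [h3, h1]
      have : pvStep t level = level.flatMap fun L =>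
          (t.filter fun a => !L.contains a).map fun a => [a] ++ L := rfl
      rw [← this, List.append_assoc]

theorem memo_spec (t : List Int) (memo : PySem.Dict (List Int) (List (List (List Int))))
    (hm : pvInv memo) :
    (pvApMemo t memo).1 = all_ordered_partitions t ∧ pvInv (pvApMemo t memo).2 := by
  suffices H : ∀ (n : Nat) (t : List Int), t.length ≤ n →
      ∀ memo, pvInv memo →
        (pvApMemo t memo).1 = all_ordered_partitions t ∧ pvInv (pvApMemo t memo).2 by
    exact H t.length t le_rfl memo hm
  clear hm memo t
  intro n
  induction n with
  | zero =>
    intro t hlen memo hm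
    have ht : t = [] := by cases t <;> simp_all
    subst ht
    rw [pvApMemo]
    cases hg : memo.get? ([] : List Int) with
    | some r =>
      exact ⟨hm [] r hg, hm⟩
    | none =>
      simp only [List.isEmpty_nil, if_pos]
      have hA : all_ordered_partitions ([] : List Int) = [[]] := by rw [A_flat]; simp
      refine ⟨hA.symm, ?_⟩
      intro k r hk
      rw [PySem.Dict.get?_insert] at hk
      split at hk
      · next heq => subst heq; rw [hA]; exact (Option.some_inj.mp hk).symm
      · exact hm k r hk
  | succ n ih =>
    intro t hlen memo hm
    have hrec : ∀ l, l.length < t.length → ∀ m, pvInv m →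
        (pvApMemo l m).1 = all_ordered_partitions l ∧ pvInv (pvApMemo l m).2 :=
      fun l hl m hm' => ih l (by omega) m hm'
    rw [pvApMemo]
    cases hg : memo.get? t with
    | some r =>
      exact ⟨hm t r hg, hm⟩
    | none =>
      by_cases hemp : t.isEmpty
      · rw [if_pos hemp]
        have ht : t = [] := by simpa [List.isEmpty_iff] using hemp
        subst ht
        have hA : all_ordered_partitions ([] : List Int) = [[]] := by rw [A_flat]; simp
        refine ⟨hA.symm, ?_⟩
        intro k r hk
        rw [PySem.Dict.get?_insert] at hk
        split at hk
        · next heq => subst heq; rw [hA]; exact (Option.some_inj.mp hk).symm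
        · exact hm k r hk
      · rw [if_neg hemp]
        have hlev0 : ∀ cell ∈ t.map fun x => [x], ∃ x ∈ t, x ∈ cell := by
          intro cell hc
          obtain ⟨x, hx, rfl⟩ := List.mem_map.mp hc
          exact ⟨x, hx, by simp⟩
        obtain ⟨h1, h2⟩ := loop_spec t hrec (t.length + 1) (t.map fun x => [x]) [] memo hm hlev0
        have hlvl0 : (t.map fun x => [x]) = pvLvl t 0 := rfl
        have hAt : (pvApLoop t (t.length + 1) (t.map fun x => [x]) [] memo).1 =
            all_ordered_partitions t := by
          rw [h1, hlvl0, List.nil_append, J_flat, List.range_succ, List.flatMap_append]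
          have hnil : pvF t (pvLvl t t.length) = [] := by
            rw [lvl_full_nil]; rfl
          rw [A_flat, if_neg (by simpa [List.isEmpty_iff, List.length_eq_zero_iff] using hemp)]
          simp [hnil]
        refine ⟨hAt, ?_⟩
        intro k r hk
        rw [PySem.Dict.get?_insert] at hk
        split at hk
        · next heq => subst heq; rw [← hAt]; exact (Option.some_inj.mp hk).symm
        · exact h2 k r hk

-- ===== VERDICT (by name: the statement is the Claim_ definition above) =====
theorem all_ordered_partitions_spec : Claim_equal_all_ordered_partitions := by
  intro listy _
  unfold Spec_all_ordered_partitions all_ordered_partitions_alt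
  have hinv : pvInv PySem.Dict.empty := by
    intro k r h
    simp [PySem.Dict.get?_empty] at h
  exact ((memo_spec listy PySem.Dict.empty hinv).1).symm
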